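-- pv_equiv track=rewrite | github.com/vioSpark/reproduction-prjocet-DL2021 | SESN_parts.py | generate_hermite_list
-- ===== SOURCE A (Python) =====
-- def generate_hermite_list(Nb):
--     # this code is ugly as fuck
--     counter = 0
--     config = []
--     while True:
--         for i in range(counter + 1):
--             config.append((i, counter - i))
--             if len(config) == Nb:
--                 return config
--         counter += 1
-- ===== SOURCE B (Python) =====
-- def _isqrt(n):
--     # integer square root by Newton's method (no floats)
--     if n == 0:
--         return 0
--     x = n
--     y = (x + 1) // 2
--     while y < x:
--         x = y
--         y = (x + n // x) // 2
--     return x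
--
--
-- def generate_hermite_list(Nb):
--     # closed form: pair number k lies on anti-diagonal d with d(d+1)/2 <= k < (d+1)(d+2)/2,
--     # recovered directly from k by inverting the triangular numbers with an integer sqrt
--     config = []
--     for k in range(Nb):
--         d = (_isqrt(8 * k + 1) - 1) // 2
--         i = k - d * (d + 1) // 2
--         config.append((i, d - i))
--     return config
-- ===== Notes on version B (the rewrite author's own statement) =====
-- stated objective: alternative
-- what changed: Replaces A's stateful nested (counter, range) loops with a direct closed-form map over k in range(Nb): each pair is computed independently from its index k by inverting the triangular numbers with a hand-written Newton integer square root d=(isqrt(8k+1)-1)//2, i=k-d(d+1)//2.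
-- outside the precondition, e.g. on generate_hermite_list(0): A does not finish within the time limit, B returns []
import Mathlib
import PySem

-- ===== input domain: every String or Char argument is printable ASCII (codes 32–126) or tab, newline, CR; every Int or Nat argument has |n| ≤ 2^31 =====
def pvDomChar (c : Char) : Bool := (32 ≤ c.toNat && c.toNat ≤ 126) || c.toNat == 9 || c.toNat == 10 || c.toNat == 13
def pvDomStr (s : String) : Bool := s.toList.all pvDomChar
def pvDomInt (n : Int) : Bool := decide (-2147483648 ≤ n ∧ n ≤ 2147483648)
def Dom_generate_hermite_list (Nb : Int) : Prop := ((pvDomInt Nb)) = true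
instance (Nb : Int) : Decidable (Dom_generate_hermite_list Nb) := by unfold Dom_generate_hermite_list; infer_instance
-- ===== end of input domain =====

-- B replaces A's stateful nested loops by a closed-form map over k in range(Nb): each pair is
-- computed independently from its index via a Newton integer square root inverting the
-- triangular numbers; both A and B diverge... A diverges for Nb ≤ 0 (excluded by Pre_), B returns [].


-- ===== PORT A =====
-- inner 'for i in range(counter+1)' loop: rem = iterations left; .inl = early return fired,
-- .inr = loop finished with the updated config
def pyInnerA (Nb : Int) (counter : Nat) (i rem : Nat) (config : List (Int × Int)) :
    Sum (List (Int × Int)) (List (Int × Int)) :=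
  match rem with
  | 0 => .inr config
  | r + 1 =>
    let config' := config ++ [((i : Int), (counter : Int) - (i : Int))]
    if (config'.length : Int) = Nb then .inl config'
    else pyInnerA Nb counter (i + 1) r config'

-- outer 'while True' loop; Python diverges when it never returns, so it is run on fuel
-- Nb.toNat, which Pre_ (Nb ≥ 1) makes sufficient (each outer iteration appends ≥ 1 pair)
def pyLoopA (Nb : Int) (counter : Nat) (config : List (Int × Int)) : Nat → List (Int × Int)
  | 0 => config
  | fA + 1 =>
    match pyInnerA Nb counter 0 (counter + 1) config with
    | .inl res => res
    | .inr config' => pyLoopA Nb (counter + 1) config' fA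

def generate_hermite_list (Nb : Int) : List (Int × Int) :=
  pyLoopA Nb 0 [] Nb.toNat

-- ===== PORT B =====
-- the 'while y < x' Newton loop of _isqrt; the extra '0 < y' in the guard only makes the
-- recursion well-founded: on every reachable state (n ≥ 1) y stays ≥ 1, so it never fires
def pyIsqrtLoop (n x y : Int) : Int :=
  if h : 0 < y ∧ y < x then
    pyIsqrtLoop n y (PySem.Int.floordiv (y + PySem.Int.floordiv n y) 2)
  else x
termination_by x.toNat
decreasing_by omega

def pyIsqrt (n : Int) : Int :=
  if n = 0 then 0 else pyIsqrtLoop n n (PySem.Int.floordiv (n + 1) 2)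

def generate_hermite_list_alt (Nb : Int) : List (Int × Int) :=
  (PySem.List.pyRange 0 Nb 1).foldl
    (fun config k =>
      let d := PySem.Int.floordiv (pyIsqrt (8 * k + 1) - 1) 2
      let i := k - PySem.Int.floordiv (d * (d + 1)) 2
      config ++ [(i, d - i)]) []

-- ===== PRECONDITION & SPEC =====
-- Pre_ excludes exactly Nb ≤ 0, where the Python A loops forever and never returns.
def Pre_generate_hermite_list (Nb : Int) : Prop := 1 ≤ Nb
instance (Nb : Int) : Decidable (Pre_generate_hermite_list Nb) := by
  unfold Pre_generate_hermite_list; infer_instance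
def pvWitness_generate_hermite_list : Int := 7

def Spec_generate_hermite_list (Nb : Int) (out : List (Int × Int)) : Prop := out = generate_hermite_list_alt Nb
instance (Nb : Int) (out : List (Int × Int)) : Decidable (Spec_generate_hermite_list Nb out) := by unfold Spec_generate_hermite_list; infer_instance

-- ===== CLAIM (what is proved, stated in full; the proofs are below) =====
def Claim_equal_generate_hermite_list : Prop := ∀ (Nb : Int), Dom_generate_hermite_list Nb → Pre_generate_hermite_list Nb → Spec_generate_hermite_list Nb (generate_hermite_list Nb)

-- ===== LEMMAS AND PROOFS =====

-- the pure stream of the first f pairs emitted from state (i, j) by A's diagonal walk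
def emitDiag : Nat → Int → Int → List (Int × Int)
  | 0, _, _ => []
  | f + 1, i, j => (i, j) :: (if j > 0 then emitDiag f (i + 1) (j - 1) else emitDiag f 0 (i + 1))

theorem pyInnerA_some (Nb : Int) (c : Nat) : ∀ (rem : Nat) (i : Nat) (config : List (Int × Int)) (f : Nat),
    i + rem = c + 1 → 1 ≤ f → f ≤ rem → (config.length : Int) + f = Nb →
    pyInnerA Nb c i rem config = .inl (config ++ emitDiag f i ((c : Int) - i)) := by
  intro rem
  induction rem with
  | zero => intro i config f h1 h2 h3; omega
  | succ r ih =>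
    intro i config f hic hf1 hfr hlen
    obtain ⟨g, rfl⟩ : ∃ g, f = g + 1 := ⟨f - 1, by omega⟩
    simp only [pyInnerA]
    rcases Nat.eq_zero_or_pos g with hg | hg
    · subst hg
      have heq : ((config ++ [((i : Int), (c : Int) - i)]).length : Int) = Nb := by simp; omega
      rw [if_pos heq]
      simp [emitDiag]
    · have hne : ¬ ((config ++ [((i : Int), (c : Int) - i)]).length : Int) = Nb := by simp; omega
      rw [if_neg hne]
      have hlen' : ((config ++ [((i : Int), (c : Int) - i)]).length : Int) + (g : Int) = Nb := by
        simp; omega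
      have hrec := ih (i + 1) (config ++ [((i : Int), (c : Int) - i)]) g
        (by omega) (by omega) (by omega) hlen'
      have e2 : (c : Int) - ((i : Int) + 1) = (c : Int) - i - 1 := by ring
      push_cast at hrec
      rw [e2] at hrec
      rw [hrec]
      have hj : ((c : Int) - i) > 0 := by omega
      simp only [emitDiag]
      rw [if_pos hj]
      simp

theorem pyInnerA_none (Nb : Int) (c : Nat) : ∀ (rem : Nat) (i : Nat) (config : List (Int × Int)) (f : Nat),
    1 ≤ rem → i + rem = c + 1 → rem < f → (config.length : Int) + f = Nb →
    ∃ P : List (Int × Int), pyInnerA Nb c i rem config = .inr (config ++ P) ∧ P.length = rem ∧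
      emitDiag f i ((c : Int) - i) = P ++ emitDiag (f - rem) 0 ((c : Int) + 1) := by
  intro rem
  induction rem with
  | zero => intro i config f h; omega
  | succ r ih =>
    intro i config f _ hic hrf hlen
    obtain ⟨g, rfl⟩ : ∃ g, f = g + 1 := ⟨f - 1, by omega⟩
    simp only [pyInnerA]
    have hne : ¬ ((config ++ [((i : Int), (c : Int) - i)]).length : Int) = Nb := by simp; omega
    rw [if_neg hne]
    rcases Nat.eq_zero_or_pos r with hr | hr
    · subst hr
      refine ⟨[((i : Int), (c : Int) - i)], by simp [pyInnerA], by simp, ?_⟩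
      have hj : ¬ ((c : Int) - i) > 0 := by omega
      simp only [emitDiag]
      rw [if_neg hj]
      have e1 : ((i : Int)) + 1 = (c : Int) + 1 := by omega
      rw [e1]
      simp
    · have hlen' : ((config ++ [((i : Int), (c : Int) - i)]).length : Int) + (g : Int) = Nb := by
        simp; omega
      obtain ⟨P, hP1, hP2, hP3⟩ := ih (i + 1) (config ++ [((i : Int), (c : Int) - i)]) g
        hr (by omega) (by omega) hlen'
      refine ⟨((i : Int), (c : Int) - i) :: P, by simp [hP1], by simp [hP2], ?_⟩
      have hj : ((c : Int) - i) > 0 := by omega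
      simp only [emitDiag]
      rw [if_pos hj]
      have e2 : (c : Int) - ((i : Int) + 1) = (c : Int) - i - 1 := by ring
      push_cast at hP3
      rw [e2] at hP3
      have e3 : g + 1 - (r + 1) = g - r := by omega
      rw [e3, hP3]
      simp

theorem pyLoopA_emit (Nb : Int) : ∀ (fA : Nat) (c : Nat) (config : List (Int × Int)) (f : Nat),
    1 ≤ f → f ≤ fA → (config.length : Int) + f = Nb →
    pyLoopA Nb c config fA = config ++ emitDiag f 0 (c : Int) := by
  intro fA
  induction fA with
  | zero => intro c config f h1 h2; omega
  | succ g ih =>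
    intro c config f hf1 hfA hlen
    simp only [pyLoopA]
    rcases Nat.lt_or_ge (c + 1) f with hlt | hle
    swap
    · have h := pyInnerA_some Nb c (c + 1) 0 config f (by omega) hf1 hle (by simpa using hlen)
      simp only [Nat.cast_zero, Int.sub_zero] at h
      simp only [h]
    · obtain ⟨P, hP1, hP2, hP3⟩ := pyInnerA_none Nb c (c + 1) 0 config f (by omega) (by omega) hlt
        (by simpa using hlen)
      simp only [Nat.cast_zero, Int.sub_zero] at hP1 hP3
      simp only [hP1]
      have hlen' : (((config ++ P).length : Int)) + ((f - (c + 1) : Nat) : Int) = Nb := by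
        simp [hP2]; omega
      rw [ih (c + 1) (config ++ P) (f - (c + 1)) (by omega) (by omega) hlen']
      rw [hP3]
      push_cast
      simp


-- ---- B side: Newton isqrt correctness ----

theorem pyIsqrtLoop_eq (n : Int) (hn : 1 ≤ n) :
    ∀ (m : Nat) (x : Int), x.toNat ≤ m → 1 ≤ x → (Nat.sqrt n.toNat : Int) ≤ x →
    pyIsqrtLoop n x (PySem.Int.floordiv (x + PySem.Int.floordiv n x) 2) = (Nat.sqrt n.toNat : Int) := by
  have hs1 : 1 ≤ Nat.sqrt n.toNat := Nat.sqrt_pos.mpr (by omega)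
  have hq := Nat.sqrt_le' n.toNat
  rw [pow_two] at hq
  have hs2 : (Nat.sqrt n.toNat : Int) * (Nat.sqrt n.toNat : Int) ≤ n := by
    have h : ((Nat.sqrt n.toNat * Nat.sqrt n.toNat : Nat) : Int) ≤ (n.toNat : Int) := by
      exact_mod_cast hq
    push_cast at h
    rw [Int.toNat_of_nonneg (by omega)] at h
    exact h
  intro m
  induction m with
  | zero => intro x h1 h2 h3; exact absurd h1 (by omega)
  | succ m ih =>
    intro x hxm hx1 hsx
    have hsy : (Nat.sqrt n.toNat : Int) ≤ PySem.Int.floordiv (x + PySem.Int.floordiv n x) 2 := by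
      rw [PySem.Int.le_floordiv_iff_mul_le (by omega : (0:Int) < 2)]
      by_cases hc : 2 * (Nat.sqrt n.toNat : Int) ≤ x
      · have h0 : (0:Int) ≤ PySem.Int.floordiv n x :=
          (PySem.Int.le_floordiv_iff_mul_le (by omega)).mpr (by linarith)
        linarith
      · have h1 : ((Nat.sqrt n.toNat : Int) * 2 - x) * x ≤ n := by
          nlinarith [hs2, sq_nonneg ((Nat.sqrt n.toNat : Int) - x)]
        have h2 : (Nat.sqrt n.toNat : Int) * 2 - x ≤ PySem.Int.floordiv n x :=
          (PySem.Int.le_floordiv_iff_mul_le (by omega)).mpr h1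
        linarith
    rw [pyIsqrtLoop]
    by_cases hcond : 0 < PySem.Int.floordiv (x + PySem.Int.floordiv n x) 2 ∧
        PySem.Int.floordiv (x + PySem.Int.floordiv n x) 2 < x
    · rw [dif_pos hcond]
      exact ih _ (by omega) (by omega) hsy
    · rw [dif_neg hcond]
      have h0y : 0 < PySem.Int.floordiv (x + PySem.Int.floordiv n x) 2 := by omega
      have hxy : x ≤ PySem.Int.floordiv (x + PySem.Int.floordiv n x) 2 := by
        rcases lt_or_ge (PySem.Int.floordiv (x + PySem.Int.floordiv n x) 2) x with h | h
        · exact absurd ⟨h0y, h⟩ hcond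
        · exact h
      have h1 : x * 2 ≤ x + PySem.Int.floordiv n x := by
        rw [PySem.Int.le_floordiv_iff_mul_le (by omega : (0:Int) < 2)] at hxy
        exact hxy
      have h2 : x * x ≤ n :=
        (PySem.Int.le_floordiv_iff_mul_le (by omega)).mp (by linarith)
      have h4 : x.toNat * x.toNat ≤ n.toNat := by
        have e1 : ((x.toNat * x.toNat : Nat) : Int) ≤ ((n.toNat : Nat) : Int) := by
          push_cast
          rw [Int.toNat_of_nonneg (by omega : (0:Int) ≤ x), Int.toNat_of_nonneg (by omega : (0:Int) ≤ n)]
          exact h2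
        exact_mod_cast e1
      have h5 : x.toNat ≤ Nat.sqrt n.toNat := by
        by_contra hc
        have hc' : Nat.sqrt n.toNat < x.toNat := by omega
        have hl := Nat.lt_succ_sqrt' n.toNat
        rw [pow_two] at hl
        have : n.toNat < x.toNat * x.toNat :=
          lt_of_lt_of_le hl (Nat.mul_le_mul (by omega) (by omega))
        omega
      omega

theorem pyIsqrt_eq (n : Int) (hn : 1 ≤ n) : pyIsqrt n = (Nat.sqrt n.toNat : Int) := by
  have hnn : PySem.Int.floordiv n n = 1 := by
    rw [PySem.Int.floordiv_eq_iff_of_pos (by omega)]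
    constructor <;> linarith
  have hsn : (Nat.sqrt n.toNat : Int) ≤ n := by
    have := Nat.sqrt_le_self n.toNat
    omega
  unfold pyIsqrt
  rw [if_neg (by omega : ¬ n = 0)]
  have h := pyIsqrtLoop_eq n hn n.toNat n le_rfl hn hsn
  rw [hnn] at h
  exact h

-- ---- triangular numbers and the diagonal index ----

def TN : Nat → Nat
  | 0 => 0
  | d + 1 => TN d + d + 1

theorem TN_eq (d : Nat) : TN d = d * (d + 1) / 2 := by
  induction d with
  | zero => rfl
  | succ e ih =>
    have h1 : e * (e + 1) % 2 = 0 := Nat.even_iff.mp (Nat.even_mul_succ_self e)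
    have h2 : (e + 1) * (e + 1 + 1) = e * (e + 1) + 2 * (e + 1) := by ring
    simp only [TN, ih]
    omega

theorem TN_mono (a b : Nat) (h : a ≤ b) : TN a ≤ TN b := by
  induction b with
  | zero => have : a = 0 := by omega
            simp [this]
  | succ e ih =>
    rcases Nat.lt_or_ge a (e + 1) with h' | h'
    · have := ih (by omega)
      simp only [TN]
      omega
    · have : a = e + 1 := by omega
      simp [this]

def dN (k : Nat) : Nat := (Nat.sqrt (8 * k + 1) - 1) / 2
def iN (k : Nat) : Nat := k - dN k * (dN k + 1) / 2
def gN (k : Nat) : Int × Int := ((iN k : Int), ((dN k - iN k : Nat) : Int))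

theorem dN_spec (k : Nat) : TN (dN k) ≤ k ∧ k < TN (dN k) + dN k + 1 := by
  have hs1 : 1 ≤ Nat.sqrt (8 * k + 1) := Nat.sqrt_pos.mpr (by omega)
  have h1 := Nat.sqrt_le' (8 * k + 1)
  rw [pow_two] at h1
  have h2 := Nat.lt_succ_sqrt' (8 * k + 1)
  rw [pow_two] at h2
  have hd : dN k = (Nat.sqrt (8 * k + 1) - 1) / 2 := rfl
  have hb1 : 2 * dN k + 1 ≤ Nat.sqrt (8 * k + 1) := by omega
  have hb2 : Nat.sqrt (8 * k + 1) ≤ 2 * dN k + 2 := by omega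
  have h3 : (2 * dN k + 1) * (2 * dN k + 1) ≤ Nat.sqrt (8 * k + 1) * Nat.sqrt (8 * k + 1) :=
    Nat.mul_le_mul hb1 hb1
  have h4 : (Nat.sqrt (8 * k + 1)).succ * (Nat.sqrt (8 * k + 1)).succ ≤
      (2 * dN k + 3) * (2 * dN k + 3) :=
    Nat.mul_le_mul (by omega) (by omega)
  have e1 : (2 * dN k + 1) * (2 * dN k + 1) = 4 * (dN k * dN k) + 4 * dN k + 1 := by ring
  have e2 : (2 * dN k + 3) * (2 * dN k + 3) = 4 * (dN k * dN k) + 12 * dN k + 9 := by ring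
  have e3 := TN_eq (dN k)
  have e4 : dN k * (dN k + 1) = dN k * dN k + dN k := by ring
  have e5 : dN k * (dN k + 1) % 2 = 0 := Nat.even_iff.mp (Nat.even_mul_succ_self (dN k))
  omega

theorem dN_unique (k e : Nat) (h1 : TN e ≤ k) (h2 : k < TN e + e + 1) : e = dN k := by
  have hs := dN_spec k
  rcases Nat.lt_trichotomy e (dN k) with h | h | h
  · have hm : TN (e + 1) ≤ TN (dN k) := TN_mono _ _ (by omega)
    simp only [TN] at hm
    omega
  · exact h
  · have hm : TN (dN k + 1) ≤ TN e := TN_mono _ _ (by omega)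
    simp only [TN] at hm
    omega

theorem iN_eq (k : Nat) : iN k = k - TN (dN k) := by
  rw [iN, TN_eq]

theorem iN_le (k : Nat) : iN k ≤ dN k := by
  have h1 := dN_spec k
  have h2 := iN_eq k
  omega

theorem dN_succ_lt (k : Nat) (h : iN k < dN k) : dN (k + 1) = dN k ∧ iN (k + 1) = iN k + 1 := by
  have hs := dN_spec k
  have hi := iN_eq k
  have h1 : TN (dN k) ≤ k + 1 := by omega
  have h2 : k + 1 < TN (dN k) + dN k + 1 := by omega
  have hd := dN_unique (k + 1) (dN k) h1 h2
  refine ⟨hd.symm, ?_⟩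
  have hi' := iN_eq (k + 1)
  rw [← hd] at hi'
  omega

theorem dN_succ_eq (k : Nat) (h : iN k = dN k) : dN (k + 1) = dN k + 1 ∧ iN (k + 1) = 0 := by
  have hs := dN_spec k
  have hi := iN_eq k
  have h1 : TN (dN k + 1) ≤ k + 1 := by simp only [TN]; omega
  have h2 : k + 1 < TN (dN k + 1) + (dN k + 1) + 1 := by simp only [TN]; omega
  have hd := dN_unique (k + 1) (dN k + 1) h1 h2
  refine ⟨hd.symm, ?_⟩
  have hi' := iN_eq (k + 1)
  rw [← hd] at hi'
  simp only [TN] at hi'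
  omega

-- ---- the diagonal stream equals the closed-form map ----

theorem emitDiag_eq (f : Nat) : ∀ (k : Nat),
    emitDiag f (iN k) ((dN k - iN k : Nat)) = (List.range f).map (fun t => gN (k + t)) := by
  induction f with
  | zero => intro k; simp [emitDiag]
  | succ g ih =>
    intro k
    have hle := iN_le k
    have hhead : gN (k + 0) = ((iN k : Int), ((dN k - iN k : Nat) : Int)) := by simp [gN]
    have hfun : ((fun t => gN (k + t)) ∘ Nat.succ) = (fun t => gN ((k + 1) + t)) := by
      funext t
      simp only [Function.comp_apply]
      congr 1
      omega
    rw [List.range_succ_eq_map, List.map_cons, List.map_map, hhead, hfun]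
    simp only [emitDiag]
    by_cases hlt : iN k < dN k
    · have hj : ((dN k - iN k : Nat) : Int) > 0 := by omega
      obtain ⟨hd, hi⟩ := dN_succ_lt k hlt
      have e1 : (iN k : Int) + 1 = (iN (k + 1) : Int) := by rw [hi]; push_cast; ring
      have e2 : ((dN k - iN k : Nat) : Int) - 1 = ((dN (k + 1) - iN (k + 1) : Nat) : Int) := by
        rw [hd, hi]; omega
      rw [if_pos hj, e1, e2, ih (k + 1)]
    · have heq : iN k = dN k := by omega
      have hj : ¬ ((dN k - iN k : Nat) : Int) > 0 := by omega
      obtain ⟨hd, hi⟩ := dN_succ_eq k heq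
      have e1 : (0 : Int) = (iN (k + 1) : Int) := by rw [hi]; simp
      have e2 : (iN k : Int) + 1 = ((dN (k + 1) - iN (k + 1) : Nat) : Int) := by
        rw [hd, hi]; omega
      rw [if_neg hj, e2, e1, ih (k + 1)]

-- ---- B's per-index closed form ----

def fB (k : Int) : Int × Int :=
  let d := PySem.Int.floordiv (pyIsqrt (8 * k + 1) - 1) 2
  let i := k - PySem.Int.floordiv (d * (d + 1)) 2
  (i, d - i)

theorem alt_eq (Nb : Int) :
    generate_hermite_list_alt Nb = (List.range Nb.toNat).map (fun k : Nat => fB (k : Int)) := by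
  show (PySem.List.pyRange 0 Nb 1).foldl (fun config k => config ++ [fB k]) [] = _
  rw [PySem.List.foldl_append_singleton_eq_map, PySem.List.pyRange_one 0 Nb, List.map_map]
  simp [Function.comp]

theorem fB_eq (k : Nat) : fB (k : Int) = gN k := by
  have hs1 : 1 ≤ Nat.sqrt (8 * k + 1) := Nat.sqrt_pos.mpr (by omega)
  have hspec := dN_spec k
  have hiN := iN_eq k
  have hile := iN_le k
  have hTN := TN_eq (dN k)
  have h8 : 8 * (k : Int) + 1 = ((8 * k + 1 : Nat) : Int) := by push_cast; ring
  have hsq : pyIsqrt (8 * (k : Int) + 1) = (Nat.sqrt (8 * k + 1) : Int) := by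
    rw [h8, pyIsqrt_eq _ (by omega)]
    have e : ((8 * k + 1 : Nat) : Int).toNat = 8 * k + 1 := by omega
    rw [e]
  have hd : PySem.Int.floordiv (pyIsqrt (8 * (k : Int) + 1) - 1) 2 = (dN k : Int) := by
    rw [hsq]
    have e : (Nat.sqrt (8 * k + 1) : Int) - 1 = ((Nat.sqrt (8 * k + 1) - 1 : Nat) : Int) := by omega
    rw [e]
    have h := PySem.Int.floordiv_natCast (Nat.sqrt (8 * k + 1) - 1) 2
    simp only [dN]
    exact_mod_cast h
  have hT : PySem.Int.floordiv ((dN k : Int) * ((dN k : Int) + 1)) 2 = (TN (dN k) : Int) := by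
    have e : (dN k : Int) * ((dN k : Int) + 1) = ((dN k * (dN k + 1) : Nat) : Int) := by
      push_cast; ring
    rw [e, hTN]
    have h := PySem.Int.floordiv_natCast (dN k * (dN k + 1)) 2
    exact_mod_cast h
  simp only [fB, hd, hT, gN, Prod.mk.injEq]
  constructor <;> omega

-- ===== VERDICT (by name: the statement is the Claim_ definition above) =====
theorem generate_hermite_list_spec : Claim_equal_generate_hermite_list := by
  intro Nb _ hpre
  unfold Pre_generate_hermite_list at hpre
  unfold Spec_generate_hermite_list generate_hermite_list
  have hA := pyLoopA_emit Nb Nb.toNat 0 [] Nb.toNat (by omega) le_rfl (by simp; omega)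
  simp only [Nat.cast_zero, List.nil_append] at hA
  have h0 := emitDiag_eq Nb.toNat 0
  have ei : iN 0 = 0 := by decide
  have ed : dN 0 = 0 := by decide
  rw [ei, ed] at h0
  simp only [Nat.sub_zero, Nat.cast_zero, Nat.zero_add] at h0
  rw [hA, h0, alt_eq]
  exact (List.map_congr_left (fun t _ => (fB_eq t).symm))
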